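-- pv_equiv track=rewrite | github.com/procter-gamble-oss/window-size-NN | window_length_heuristic.py | split_series
-- ===== SOURCE A (Python) =====
-- def split_series(indices, margin):
--     win_idx = []
--     start = indices[0] - margin
--     i_old = start
--     for i in indices:
--         if i - i_old > 2 * margin + 1:
--             win_idx.append((start, i_old + margin))
--             start = i - margin
--
--         i_old = i
--
--     win_idx.append((start, i_old + margin))
--     return win_idx
-- ===== SOURCE B (Python) =====
-- def split_series(indices, margin):
--     thr = 2 * margin + 1
--     breaks = [(a, b) for a, b in zip(indices, indices[1:]) if b - a > thr]
--     starts = [indices[0]] + [b for _, b in breaks]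
--     ends = [a for a, _ in breaks] + [indices[-1]]
--     return [(s - margin, e + margin) for s, e in zip(starts, ends)]
-- ===== Notes on version B (the rewrite author's own statement) =====
-- stated objective: alternative
-- what changed: B replaces A's stateful scan (threading start/i_old and emitting windows inline) by a staged, loop-free construction: it zips the list with its tail to collect the break pairs where the gap exceeds 2*margin+1, derives the starts list ([indices[0]] plus the right elements of breaks) and the ends list (left elements of breaks plus indices[-1]), and zips them into windows.
-- intended difference: For margin < -1 (a nonsensical negative margin), A's sentinel i_old = indices[0]-margin makes the first gap test fire and A prepends a spurious window (indices[0]-margin, indices[0]); B returns only the windows of the real runs, which is the intended behaviour since the first index simply opens the first window. — e.g. on split_series([0], -2): A returns [(2, 0), (2, -2)], B returns [(2, -2)]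
import Mathlib
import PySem

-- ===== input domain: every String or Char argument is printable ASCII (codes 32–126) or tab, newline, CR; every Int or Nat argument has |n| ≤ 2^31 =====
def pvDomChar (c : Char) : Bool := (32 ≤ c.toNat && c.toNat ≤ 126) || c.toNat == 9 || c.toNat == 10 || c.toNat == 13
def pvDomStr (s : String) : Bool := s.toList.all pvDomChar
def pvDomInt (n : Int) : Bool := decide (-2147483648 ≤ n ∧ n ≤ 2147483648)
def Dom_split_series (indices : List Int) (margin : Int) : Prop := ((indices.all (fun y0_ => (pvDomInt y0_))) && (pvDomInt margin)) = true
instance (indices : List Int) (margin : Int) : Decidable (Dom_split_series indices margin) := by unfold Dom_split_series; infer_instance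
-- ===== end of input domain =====

-- B replaces A's stateful scan by a loop-free staged construction (zip with the tail,
-- filter the break pairs, derive starts and ends lists, zip them into windows);
-- for margin < -1 A additionally emits a spurious leading window (see D_ below).

-- ===== PORT A =====
-- loop body of A: state = (win_idx, start, i_old)
def aStep (margin : Int) (st : List (Int × Int) × Int × Int) (i : Int) : List (Int × Int) × Int × Int :=
  if i - st.2.2 > 2 * margin + 1 then (st.1 ++ [(st.2.1, st.2.2 + margin)], i - margin, i)
  else (st.1, st.2.1, i)

def split_series (indices : List Int) (margin : Int) : List (Int × Int) :=
  match indices with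
  | [] => []  -- Python raises IndexError on indices[0]; excluded by Pre_split_series
  | first :: _ =>
    let s := indices.foldl (aStep margin) ([], first - margin, first - margin)
    s.1 ++ [(s.2.1, s.2.2 + margin)]

-- ===== PORT B =====
def split_series_alt (indices : List Int) (margin : Int) : List (Int × Int) :=
  match indices with
  | [] => []  -- Python raises IndexError on indices[0]; excluded by Pre_split_series
  | first :: rest =>
    let breaks := (indices.zip rest).filter (fun p => p.2 - p.1 > 2 * margin + 1)
    let starts := first :: breaks.map (fun p => p.2)
    let ends := breaks.map (fun p => p.1) ++ [indices.getLastD 0]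
    (starts.zip ends).map (fun p => (p.1 - margin, p.2 + margin))

-- ===== PRECONDITION & SPEC =====
-- Pre_ excludes only the empty list, on which both Pythons raise IndexError.
def Pre_split_series (indices : List Int) (margin : Int) : Prop := indices ≠ []
instance (indices : List Int) (margin : Int) : Decidable (Pre_split_series indices margin) := by unfold Pre_split_series; infer_instance
def pvWitness_split_series : List Int × Int := ([1, 2, 9], 1)

-- When margin < -1, A's sentinel i_old = indices[0] - margin makes the very first gap test fire,
-- so A prepends a spurious window (indices[0] - margin, indices[0]); B returns only the windows of
-- the real runs, which is the intended value since the first index opens the first window.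
def D_split_series (indices : List Int) (margin : Int) : Prop := margin < -1
instance (indices : List Int) (margin : Int) : Decidable (D_split_series indices margin) := by unfold D_split_series; infer_instance

def Spec_split_series (indices : List Int) (margin : Int) (out : List (Int × Int)) : Prop := ¬ D_split_series indices margin → out = split_series_alt indices margin
instance (indices : List Int) (margin : Int) (out : List (Int × Int)) : Decidable (Spec_split_series indices margin out) := by unfold Spec_split_series; infer_instance

def pvDiffWitness_split_series : List Int × Int := ([0], -2)
def pvDiffWitnessOut_split_series : (List (Int × Int)) × (List (Int × Int)) := ([(2, 0), (2, -2)], [(2, -2)])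

-- ===== CLAIM (what is proved, stated in full; the proofs are below) =====
def Claim_unchanged_split_series : Prop := ∀ (indices : List Int) (margin : Int), Dom_split_series indices margin → Pre_split_series indices margin → Spec_split_series indices margin (split_series indices margin)
def Claim_changed_split_series : Prop := Dom_split_series (pvDiffWitness_split_series.1) (pvDiffWitness_split_series.2) ∧ Pre_split_series (pvDiffWitness_split_series.1) (pvDiffWitness_split_series.2) ∧ D_split_series (pvDiffWitness_split_series.1) (pvDiffWitness_split_series.2) ∧ split_series (pvDiffWitness_split_series.1) (pvDiffWitness_split_series.2) = pvDiffWitnessOut_split_series.1 ∧ split_series_alt (pvDiffWitness_split_series.1) (pvDiffWitness_split_series.2) = pvDiffWitnessOut_split_series.2 ∧ pvDiffWitnessOut_split_series.1 ≠ pvDiffWitnessOut_split_series.2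
def Claim_exact_split_series : Prop := ∀ (indices : List Int) (margin : Int), Dom_split_series indices margin → Pre_split_series indices margin → D_split_series indices margin → split_series indices margin ≠ split_series_alt indices margin

-- ===== LEMMAS AND PROOFS =====

-- A's result from the loop state (start, prev) over the remaining input, written recursively
def fA (margin start prev : Int) : List Int → List (Int × Int)
  | [] => [(start, prev + margin)]
  | i :: rest =>
    if i - prev > 2 * margin + 1 then (start, prev + margin) :: fA margin (i - margin) i rest
    else fA margin start i rest

-- B's staged construction, generalized over the (unshifted) current start and previous element
def gB (margin start0 prev : Int) (rest : List Int) : List (Int × Int) :=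
  let breaks := ((prev :: rest).zip rest).filter (fun p => p.2 - p.1 > 2 * margin + 1)
  ((start0 :: breaks.map (fun p => p.2)).zip (breaks.map (fun p => p.1) ++ [(prev :: rest).getLastD 0])).map
    (fun p => (p.1 - margin, p.2 + margin))

-- A's foldl, flushed by the trailing append, is fA
lemma foldA_eq_fA (margin : Int) (rest : List Int) : ∀ (acc : List (Int × Int)) (start prev : Int),
    (let s := rest.foldl (aStep margin) (acc, start, prev); s.1 ++ [(s.2.1, s.2.2 + margin)])
      = acc ++ fA margin start prev rest := by
  induction rest with
  | nil => intro acc start prev; simp [fA]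
  | cons i rest ih =>
    intro acc start prev
    simp only [List.foldl_cons, aStep, fA]
    by_cases h : i - prev > 2 * margin + 1
    · rw [if_pos h, if_pos h, ih, List.append_assoc]; rfl
    · rw [if_neg h, if_neg h, ih]

-- the two presentations coincide
lemma fA_eq_gB (margin : Int) (rest : List Int) : ∀ (start0 prev : Int),
    fA margin (start0 - margin) prev rest = gB margin start0 prev rest := by
  induction rest with
  | nil => intro start0 prev; simp [fA, gB]
  | cons i rest ih =>
    intro start0 prev
    simp only [fA, gB, List.zip_cons_cons, List.filter_cons, decide_eq_true_eq,
      List.getLastD_cons]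
    by_cases h : i - prev > 2 * margin + 1
    · rw [if_pos h, if_pos h]
      have := ih i i
      simp only [gB, List.getLastD_cons] at this
      simp only [List.map_cons, List.zip_cons_cons, List.cons_append]
      rw [this]
    · rw [if_neg h, if_neg h]
      have := ih start0 i
      simp only [gB, List.getLastD_cons] at this
      exact this

lemma split_eq (first : Int) (rest : List Int) (margin : Int) :
    split_series (first :: rest) margin =
      (if margin < -1 then [(first - margin, first)] else []) ++ split_series_alt (first :: rest) margin := by
  have halt : split_series_alt (first :: rest) margin = gB margin first first rest := rfl
  by_cases h : margin < -1
  · rw [if_pos h]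
    show (let s := (first :: rest).foldl (aStep margin) ([], first - margin, first - margin);
          s.1 ++ [(s.2.1, s.2.2 + margin)]) = _
    rw [List.foldl_cons]
    have hstep : aStep margin ([], first - margin, first - margin) first
        = ([(first - margin, first)], first - margin, first) := by
      simp only [aStep]
      rw [if_pos (by omega : first - (first - margin) > 2 * margin + 1)]
      simp
    rw [hstep, foldA_eq_fA, fA_eq_gB, halt]
  · rw [if_neg h]
    show (let s := (first :: rest).foldl (aStep margin) ([], first - margin, first - margin);
          s.1 ++ [(s.2.1, s.2.2 + margin)]) = _
    rw [List.foldl_cons]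
    have hstep : aStep margin ([], first - margin, first - margin) first
        = ([], first - margin, first) := by
      simp only [aStep]
      rw [if_neg (by omega)]
    rw [hstep, foldA_eq_fA, fA_eq_gB, halt]

-- ===== VERDICT (by name: the statement is the Claim_ definition above) =====
theorem split_series_spec : Claim_unchanged_split_series := by
  intro indices margin _ hpre hnd
  match indices with
  | [] => exact absurd rfl hpre
  | first :: rest =>
    simp only [D_split_series] at hnd
    have h := split_eq first rest margin
    rw [if_neg hnd] at h
    simp at h
    exact h

theorem split_series_changed : Claim_changed_split_series := by
  unfold Claim_changed_split_series; decide

theorem split_series_tight : Claim_exact_split_series := by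
  intro indices margin _ hpre hd
  match indices with
  | [] => exact absurd rfl hpre
  | first :: rest =>
    simp only [D_split_series] at hd
    have h := split_eq first rest margin
    rw [if_pos hd] at h
    intro heq
    rw [heq] at h
    simp at h
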